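-- pv_equiv track=rewrite | github.com/jeffaf/cthaeh | prefilter.py | classify_driver_class
-- ===== SOURCE A (Python) =====
-- def classify_driver_class(imports, import_dlls=None):
--     """Classify driver by type based on imports and DLLs.
--
--     Returns dict with 'class' (CRITICAL/HIGH/MEDIUM/LOW/UNKNOWN),
--     'category' description, and 'exploitability' notes.
--     """
--     if import_dlls is None:
--         import_dlls = set()
--     import_names_lower = {i.lower() for i in imports}
--
--     has_iocreatedevice = "IoCreateDevice" in imports or "iocreatedevice" in import_names_lower
--     has_wdfdrivercreate = "WdfDriverCreate" in imports or "wdfdrivercreate" in import_names_lower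
--     has_fltregisterfilter = "FltRegisterFilter" in imports or "fltregisterfilter" in import_names_lower
--
--     # CRITICAL: Raw WDM without WDF safety, or FS filter
--     if has_fltregisterfilter:
--         return {
--             "class": "CRITICAL",
--             "category": "File system filter",
--             "exploitability": "FS filters intercept all file I/O; bugs = system-wide impact",
--         }
--     if has_iocreatedevice and not has_wdfdrivercreate:
--         return {
--             "class": "CRITICAL",
--             "category": "Raw WDM driver",
--             "exploitability": "No WDF safety rails; manual IRP handling prone to bugs",
--         }
--
--     # HIGH: NDIS, Bluetooth, USB function drivers
--     ndis_imports = {"NdisRegisterProtocolDriver", "NdisMRegisterMiniportDriver"}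
--     if imports & ndis_imports:
--         return {
--             "class": "HIGH",
--             "category": "NDIS network driver",
--             "exploitability": "Network packet parsing in kernel; remote attack surface",
--         }
--
--     bt_dlls = {"bthport.sys", "bthhfp.sys"}
--     if import_dlls & bt_dlls:
--         return {
--             "class": "HIGH",
--             "category": "Bluetooth driver",
--             "exploitability": "BT stack in kernel; proximity-based attack surface",
--         }
--
--     usb_imports = {"USBD_CreateConfigurationRequestEx", "WdfUsbTargetDeviceSendControlTransferSynchronously"}
--     if imports & usb_imports:
--         return {
--             "class": "HIGH",
--             "category": "USB function driver",
--             "exploitability": "USB request handling in kernel; physical/logical attack surface",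
--         }
--
--     # MEDIUM: WDF/KMDF, display
--     if has_wdfdrivercreate:
--         return {
--             "class": "MEDIUM",
--             "category": "WDF/KMDF driver",
--             "exploitability": "WDF provides safety rails but bugs still possible",
--         }
--
--     if "DxgkInitialize" in imports or "dxgkinitialize" in import_names_lower:
--         return {
--             "class": "MEDIUM",
--             "category": "Display/GPU driver",
--             "exploitability": "Complex IOCTL surface but often well-audited",
--         }
--
--     # LOW: HID, printer, audio
--     if "PortClsCreate" in imports or "portclscreate" in import_names_lower or \
--        "PcRegisterSubdevice" in imports or "pcregistersubdevice" in import_names_lower: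
--         return {
--             "class": "LOW",
--             "category": "Audio (PortCls) driver",
--             "exploitability": "Minimal direct user IOCTL surface",
--         }
--
--     hid_imports = {"HidRegisterMinidriver", "hidregisterminidriver"}
--     if imports & hid_imports or import_names_lower & hid_imports:
--         return {
--             "class": "LOW",
--             "category": "HID minidriver",
--             "exploitability": "Limited attack surface through HID stack",
--         }
--
--     printer_dlls = {"pjlmon.dll", "tcpmon.dll", "usbmon.dll"}
--     if import_dlls & printer_dlls:
--         return {
--             "class": "LOW",
--             "category": "Printer driver",
--             "exploitability": "Typically sandboxed print pipeline",
--         }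
--
--     return {
--         "class": "UNKNOWN",
--         "category": "Unclassified",
--         "exploitability": "Manual review needed",
--     }
-- ===== SOURCE B (Python) =====
-- # Priority-index approach: keyword -> rule-priority dictionaries, one pass over the
-- # inputs collecting matched priorities, pick the minimum, look up its verdict.
--
-- RESULTS = [
--     {"class": "CRITICAL", "category": "File system filter",
--      "exploitability": "FS filters intercept all file I/O; bugs = system-wide impact"},
--     {"class": "CRITICAL", "category": "Raw WDM driver",
--      "exploitability": "No WDF safety rails; manual IRP handling prone to bugs"},
--     {"class": "HIGH", "category": "NDIS network driver",
--      "exploitability": "Network packet parsing in kernel; remote attack surface"},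
--     {"class": "HIGH", "category": "Bluetooth driver",
--      "exploitability": "BT stack in kernel; proximity-based attack surface"},
--     {"class": "HIGH", "category": "USB function driver",
--      "exploitability": "USB request handling in kernel; physical/logical attack surface"},
--     {"class": "MEDIUM", "category": "WDF/KMDF driver",
--      "exploitability": "WDF provides safety rails but bugs still possible"},
--     {"class": "MEDIUM", "category": "Display/GPU driver",
--      "exploitability": "Complex IOCTL surface but often well-audited"},
--     {"class": "LOW", "category": "Audio (PortCls) driver",
--      "exploitability": "Minimal direct user IOCTL surface"},
--     {"class": "LOW", "category": "HID minidriver",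
--      "exploitability": "Limited attack surface through HID stack"},
--     {"class": "LOW", "category": "Printer driver",
--      "exploitability": "Typically sandboxed print pipeline"},
--     {"class": "UNKNOWN", "category": "Unclassified",
--      "exploitability": "Manual review needed"},
-- ]
--
-- # case-insensitive import-name triggers
-- LOWER_RULES = {
--     "fltregisterfilter": 0,
--     "iocreatedevice": 1,       # only when WdfDriverCreate is absent
--     "wdfdrivercreate": 5,
--     "dxgkinitialize": 6,
--     "portclscreate": 7,
--     "pcregistersubdevice": 7,
--     "hidregisterminidriver": 8,
-- }
--
-- # exact-case import-name triggers
-- EXACT_RULES = {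
--     "NdisRegisterProtocolDriver": 2,
--     "NdisMRegisterMiniportDriver": 2,
--     "USBD_CreateConfigurationRequestEx": 4,
--     "WdfUsbTargetDeviceSendControlTransferSynchronously": 4,
-- }
--
-- # DLL-name triggers
-- DLL_RULES = {
--     "bthport.sys": 3,
--     "bthhfp.sys": 3,
--     "pjlmon.dll": 9,
--     "tcpmon.dll": 9,
--     "usbmon.dll": 9,
-- }
--
--
-- def classify_driver_class(imports, import_dlls=None):
--     """Classify driver by type based on imports and DLLs.
--
--     Index every trigger name by its rule priority, collect the priorities hit
--     by the inputs in one pass, and return the verdict of the smallest one.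
--     """
--     cands = []
--     has_wdf = False
--     for name in imports:
--         low = name.lower()
--         if low == "wdfdrivercreate":
--             has_wdf = True
--         if name in EXACT_RULES:
--             cands.append(EXACT_RULES[name])
--         if low in LOWER_RULES:
--             cands.append(LOWER_RULES[low])
--     for dll in (import_dlls or ()):
--         if dll in DLL_RULES:
--             cands.append(DLL_RULES[dll])
--     best = min((c for c in cands if c != 1 or not has_wdf),
--                default=len(RESULTS) - 1)
--     return RESULTS[best]
-- ===== Notes on version B (the rewrite author's own statement) =====
-- stated objective: alternative
-- what changed: Replaces A's ten-branch if/return chain by an inverted index: dictionaries map each trigger name (case-insensitive, exact-case, and DLL) to a rule priority, one pass over imports and dlls collects the priorities that fire, and the verdict is the table entry of the minimum collected priority (priority 1 suppressed when WdfDriverCreate is present).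
import Mathlib
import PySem

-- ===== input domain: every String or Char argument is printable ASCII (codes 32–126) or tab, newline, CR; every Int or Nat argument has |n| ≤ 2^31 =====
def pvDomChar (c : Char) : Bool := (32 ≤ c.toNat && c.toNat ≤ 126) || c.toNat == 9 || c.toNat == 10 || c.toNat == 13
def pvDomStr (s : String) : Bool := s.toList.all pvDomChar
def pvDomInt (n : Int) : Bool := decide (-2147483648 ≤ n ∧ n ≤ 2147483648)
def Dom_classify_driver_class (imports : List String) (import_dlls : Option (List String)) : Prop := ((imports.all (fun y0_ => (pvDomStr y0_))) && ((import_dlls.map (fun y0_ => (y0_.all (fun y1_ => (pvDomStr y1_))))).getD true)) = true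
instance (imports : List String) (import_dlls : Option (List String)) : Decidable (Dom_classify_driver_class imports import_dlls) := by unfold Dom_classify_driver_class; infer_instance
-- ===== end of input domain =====

set_option maxRecDepth 8192

-- B replaces A's ten-branch if/return chain by an inverted index (trigger name -> rule priority),
-- a single pass collecting the priorities that fire, and a minimum-priority table lookup;
-- an alternative decomposition of the same cost (return value proved equal on all inputs).


-- ===== PORT A =====
-- `imports` / `import_dlls` are Python sets: distinct elements, membership = List.contains,
-- `&` = PySem.Set.inter (built through Set.ofList per the Set invariant).
def classify_driver_class (imports : List String) (import_dlls : Option (List String)) : List (String × String) :=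
  let dlls : PySem.Set String := PySem.Set.ofList (import_dlls.getD [])  -- `if import_dlls is None: import_dlls = set()`
  let import_names_lower : PySem.Set String := PySem.Set.ofList (imports.map PySem.Str.lower)
  let has_iocreatedevice := imports.contains "IoCreateDevice" || PySem.Set.contains import_names_lower "iocreatedevice"
  let has_wdfdrivercreate := imports.contains "WdfDriverCreate" || PySem.Set.contains import_names_lower "wdfdrivercreate"
  let has_fltregisterfilter := imports.contains "FltRegisterFilter" || PySem.Set.contains import_names_lower "fltregisterfilter"
  if has_fltregisterfilter then
    [("class", "CRITICAL"), ("category", "File system filter"),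
     ("exploitability", "FS filters intercept all file I/O; bugs = system-wide impact")]
  else if has_iocreatedevice && !has_wdfdrivercreate then
    [("class", "CRITICAL"), ("category", "Raw WDM driver"),
     ("exploitability", "No WDF safety rails; manual IRP handling prone to bugs")]
  else if !(PySem.Set.inter (PySem.Set.ofList imports)
              ["NdisRegisterProtocolDriver", "NdisMRegisterMiniportDriver"]).isEmpty then
    [("class", "HIGH"), ("category", "NDIS network driver"),
     ("exploitability", "Network packet parsing in kernel; remote attack surface")]
  else if !(PySem.Set.inter dlls ["bthport.sys", "bthhfp.sys"]).isEmpty then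
    [("class", "HIGH"), ("category", "Bluetooth driver"),
     ("exploitability", "BT stack in kernel; proximity-based attack surface")]
  else if !(PySem.Set.inter (PySem.Set.ofList imports)
              ["USBD_CreateConfigurationRequestEx",
               "WdfUsbTargetDeviceSendControlTransferSynchronously"]).isEmpty then
    [("class", "HIGH"), ("category", "USB function driver"),
     ("exploitability", "USB request handling in kernel; physical/logical attack surface")]
  else if has_wdfdrivercreate then
    [("class", "MEDIUM"), ("category", "WDF/KMDF driver"),
     ("exploitability", "WDF provides safety rails but bugs still possible")]
  else if imports.contains "DxgkInitialize" || PySem.Set.contains import_names_lower "dxgkinitialize" then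
    [("class", "MEDIUM"), ("category", "Display/GPU driver"),
     ("exploitability", "Complex IOCTL surface but often well-audited")]
  else if imports.contains "PortClsCreate" || PySem.Set.contains import_names_lower "portclscreate" ||
          imports.contains "PcRegisterSubdevice" || PySem.Set.contains import_names_lower "pcregistersubdevice" then
    [("class", "LOW"), ("category", "Audio (PortCls) driver"),
     ("exploitability", "Minimal direct user IOCTL surface")]
  else if !(PySem.Set.inter (PySem.Set.ofList imports)
              ["HidRegisterMinidriver", "hidregisterminidriver"]).isEmpty ||
          !(PySem.Set.inter import_names_lower ["HidRegisterMinidriver", "hidregisterminidriver"]).isEmpty then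
    [("class", "LOW"), ("category", "HID minidriver"),
     ("exploitability", "Limited attack surface through HID stack")]
  else if !(PySem.Set.inter dlls ["pjlmon.dll", "tcpmon.dll", "usbmon.dll"]).isEmpty then
    [("class", "LOW"), ("category", "Printer driver"),
     ("exploitability", "Typically sandboxed print pipeline")]
  else
    [("class", "UNKNOWN"), ("category", "Unclassified"), ("exploitability", "Manual review needed")]

-- ===== PORT B =====
-- RESULTS table of Source B: verdict at rule priority k; last entry = UNKNOWN
def pvResults : List (List (String × String)) :=
  [[("class", "CRITICAL"), ("category", "File system filter"),
    ("exploitability", "FS filters intercept all file I/O; bugs = system-wide impact")],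
   [("class", "CRITICAL"), ("category", "Raw WDM driver"),
    ("exploitability", "No WDF safety rails; manual IRP handling prone to bugs")],
   [("class", "HIGH"), ("category", "NDIS network driver"),
    ("exploitability", "Network packet parsing in kernel; remote attack surface")],
   [("class", "HIGH"), ("category", "Bluetooth driver"),
    ("exploitability", "BT stack in kernel; proximity-based attack surface")],
   [("class", "HIGH"), ("category", "USB function driver"),
    ("exploitability", "USB request handling in kernel; physical/logical attack surface")],
   [("class", "MEDIUM"), ("category", "WDF/KMDF driver"),
    ("exploitability", "WDF provides safety rails but bugs still possible")],
   [("class", "MEDIUM"), ("category", "Display/GPU driver"),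
    ("exploitability", "Complex IOCTL surface but often well-audited")],
   [("class", "LOW"), ("category", "Audio (PortCls) driver"),
    ("exploitability", "Minimal direct user IOCTL surface")],
   [("class", "LOW"), ("category", "HID minidriver"),
    ("exploitability", "Limited attack surface through HID stack")],
   [("class", "LOW"), ("category", "Printer driver"),
    ("exploitability", "Typically sandboxed print pipeline")],
   [("class", "UNKNOWN"), ("category", "Unclassified"), ("exploitability", "Manual review needed")]]

-- case-insensitive import-name triggers (LOWER_RULES of Source B)
def pvLowerRules : PySem.Dict String Nat :=
  PySem.Dict.mk [("fltregisterfilter", 0), ("iocreatedevice", 1), ("wdfdrivercreate", 5),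
                 ("dxgkinitialize", 6), ("portclscreate", 7), ("pcregistersubdevice", 7),
                 ("hidregisterminidriver", 8)]

-- exact-case import-name triggers (EXACT_RULES of Source B)
def pvExactRules : PySem.Dict String Nat :=
  PySem.Dict.mk [("NdisRegisterProtocolDriver", 2), ("NdisMRegisterMiniportDriver", 2),
                 ("USBD_CreateConfigurationRequestEx", 4),
                 ("WdfUsbTargetDeviceSendControlTransferSynchronously", 4)]

-- DLL-name triggers (DLL_RULES of Source B)
def pvDllRules : PySem.Dict String Nat :=
  PySem.Dict.mk [("bthport.sys", 3), ("bthhfp.sys", 3),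
                 ("pjlmon.dll", 9), ("tcpmon.dll", 9), ("usbmon.dll", 9)]

-- body of Source B's `for name in imports` loop
def pvImportStep (st : List Nat × Bool) (name : String) : List Nat × Bool :=
  let low := PySem.Str.lower name
  let hw := st.2 || (low == "wdfdrivercreate")
  let c1 := match PySem.Dict.get? pvExactRules name with
    | some r => st.1 ++ [r]
    | none => st.1
  let c2 := match PySem.Dict.get? pvLowerRules low with
    | some r => c1 ++ [r]
    | none => c1
  (c2, hw)

-- body of Source B's `for dll in (import_dlls or ())` loop
def pvDllStep (acc : List Nat) (d : String) : List Nat :=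
  match PySem.Dict.get? pvDllRules d with
  | some r => acc ++ [r]
  | none => acc

def classify_driver_class_alt (imports : List String) (import_dlls : Option (List String)) : List (String × String) :=
  let st := imports.foldl pvImportStep ([], false)           -- (cands, has_wdf) after the imports loop
  let cands := (import_dlls.getD []).foldl pvDllStep st.1    -- cands after the dlls loop
  -- min((c for c in cands if c != 1 or not has_wdf), default=len(RESULTS)-1)
  let best := (PySem.List.min? (cands.filter (fun c => (c != 1) || !st.2)) (fun x => x)).getD
                (pvResults.length - 1)
  pvResults.getD best []                                     -- RESULTS[best] (best < len(RESULTS) always)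

-- ===== PRECONDITION & SPEC =====
def Spec_classify_driver_class (imports : List String) (import_dlls : Option (List String)) (out : List (String × String)) : Prop := out = classify_driver_class_alt imports import_dlls
instance (imports : List String) (import_dlls : Option (List String)) (out : List (String × String)) : Decidable (Spec_classify_driver_class imports import_dlls out) := by unfold Spec_classify_driver_class; infer_instance

-- ===== CLAIM (what is proved, stated in full; the proofs are below) =====
def Claim_equal_classify_driver_class : Prop := ∀ (imports : List String) (import_dlls : Option (List String)), Dom_classify_driver_class imports import_dlls → Spec_classify_driver_class imports import_dlls (classify_driver_class imports import_dlls)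

-- ===== LEMMAS AND PROOFS =====

-- Python's str.lower on a single char, applied twice
lemma lowerChar_idem (c : Char) : PySem.Chars.lowerChar (PySem.Chars.lowerChar c) = PySem.Chars.lowerChar c := by
  unfold PySem.Chars.lowerChar PySem.Chars.isupper
  split_ifs with h1 h2
  · exfalso
    simp only [Bool.and_eq_true, decide_eq_true_eq, Char.le_def, UInt32.le_iff_toNat_le] at h1 h2
    have hA : ('A'.val.toNat) = 65 := rfl
    have hZ : ('Z'.val.toNat) = 90 := rfl
    have hct : c.toNat = c.val.toNat := rfl
    have hup : 65 ≤ c.toNat ∧ c.toNat ≤ 90 := by rw [hct, ← hA, ← hZ]; exact h1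
    have hvalid : (c.toNat + 32).isValidChar := Or.inl (by omega)
    have hv : (Char.ofNat (c.toNat + 32)).val.toNat = c.toNat + 32 := by
      show (Char.ofNat (c.toNat + 32)).toNat = c.toNat + 32
      rw [Char.toNat_ofNat]; simp [hvalid]
    have h2' : (Char.ofNat (c.toNat + 32)).val.toNat ≤ 'Z'.val.toNat := h2.2
    rw [hv, hZ] at h2'
    omega
  · rfl
  · rfl

-- `s.lower()` is idempotent
lemma lower_idem (s : String) : PySem.Str.lower (PySem.Str.lower s) = PySem.Str.lower s := by
  have h : (PySem.Str.lower (PySem.Str.lower s)).toList = (PySem.Str.lower s).toList := by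
    simp only [PySem.Str.toList_lower]
    show (s.toList.map PySem.Chars.lowerChar).map PySem.Chars.lowerChar = s.toList.map PySem.Chars.lowerChar
    rw [List.map_map]
    exact List.map_congr_left (fun c _ => lowerChar_idem c)
  exact String.toList_injective h

-- `s in imports or s.lower() in {i.lower() for i in imports}` collapses to the lowered test
lemma contains_or_lower (imports : List String) (s t : String) (h : PySem.Str.lower s = t) :
    (imports.contains s || PySem.Set.contains (PySem.Set.ofList (imports.map PySem.Str.lower)) t)
      = PySem.Set.contains (PySem.Set.ofList (imports.map PySem.Str.lower)) t := by
  cases hc : imports.contains s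
  · simp
  · have hs : s ∈ imports := by simpa using hc
    have ht : t ∈ imports.map PySem.Str.lower := h ▸ List.mem_map_of_mem hs
    simp [PySem.Set.contains_eq_listContains, PySem.Set.mem_ofList, ht]

-- the four-way `or` of A's audio test collapses to the two lowered tests
lemma audio_or_collapse (imports : List String) :
    (imports.contains "PortClsCreate"
      || PySem.Set.contains (PySem.Set.ofList (imports.map PySem.Str.lower)) "portclscreate"
      || imports.contains "PcRegisterSubdevice"
      || PySem.Set.contains (PySem.Set.ofList (imports.map PySem.Str.lower)) "pcregistersubdevice")
    = (PySem.Set.contains (PySem.Set.ofList (imports.map PySem.Str.lower)) "portclscreate"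
      || PySem.Set.contains (PySem.Set.ofList (imports.map PySem.Str.lower)) "pcregistersubdevice") := by
  rw [Bool.eq_iff_iff]
  simp only [Bool.or_eq_true, PySem.Set.contains_eq_listContains, List.contains_iff_mem,
             PySem.Set.mem_ofList]
  constructor
  · rintro (((h | h) | h) | h)
    · exact Or.inl (by simpa using List.mem_map_of_mem (f := PySem.Str.lower) h)
    · exact Or.inl h
    · exact Or.inr (by simpa using List.mem_map_of_mem (f := PySem.Str.lower) h)
    · exact Or.inr h
  · rintro (h | h)
    · exact Or.inl (Or.inl (Or.inr h))
    · exact Or.inr h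

-- A's HID test (`imports & hid or lowered & hid`) collapses to the lowered lookup: an
-- uppercase-containing name is never in the image of str.lower (lower_idem)
lemma hid_collapse (imports : List String) :
    (!(PySem.Set.inter (PySem.Set.ofList imports)
        ["HidRegisterMinidriver", "hidregisterminidriver"]).isEmpty ||
     !(PySem.Set.inter (PySem.Set.ofList (imports.map PySem.Str.lower))
        ["HidRegisterMinidriver", "hidregisterminidriver"]).isEmpty)
    = PySem.Set.contains (PySem.Set.ofList (imports.map PySem.Str.lower)) "hidregisterminidriver" := by
  rw [Bool.eq_iff_iff]
  simp only [Bool.or_eq_true, Bool.not_eq_true', List.isEmpty_eq_false_iff_exists_mem,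
             PySem.Set.contains_eq_listContains, List.contains_iff_mem, PySem.Set.mem_ofList,
             PySem.Set.mem_inter, List.mem_cons, List.not_mem_nil, or_false]
  constructor
  · rintro (⟨x, hx1, hx2⟩ | ⟨x, hx1, hx2⟩)
    · rcases hx2 with h | h
      · subst h; simpa using List.mem_map_of_mem (f := PySem.Str.lower) hx1
      · subst h; simpa using List.mem_map_of_mem (f := PySem.Str.lower) hx1
    · rcases hx2 with h | h
      · exfalso
        subst h
        obtain ⟨s, _, hs⟩ := List.mem_map.mp hx1
        have h2 := congrArg PySem.Str.lower hs
        rw [lower_idem, hs] at h2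
        exact absurd h2 (by decide)
      · subst h; exact hx1
  · intro h
    exact Or.inr ⟨"hidregisterminidriver", h, by decide⟩

-- dict-lookup characterizations for the three literal rule tables
lemma lower_get_iff (s : String) (r : Nat) :
    PySem.Dict.get? pvLowerRules s = some r ↔
      ((s = "fltregisterfilter" ∧ r = 0) ∨ (s = "iocreatedevice" ∧ r = 1) ∨
       (s = "wdfdrivercreate" ∧ r = 5) ∨ (s = "dxgkinitialize" ∧ r = 6) ∨
       (s = "portclscreate" ∧ r = 7) ∨ (s = "pcregistersubdevice" ∧ r = 7) ∨
       (s = "hidregisterminidriver" ∧ r = 8)) := by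
  simp only [pvLowerRules, PySem.Dict.get?_mk_cons]
  split_ifs with h1 h2 h3 h4 h5 h6 h7
  · simp only [beq_iff_eq] at h1; subst h1; simp [eq_comm]
  · simp only [beq_iff_eq] at h2; subst h2; simp [eq_comm]
  · simp only [beq_iff_eq] at h3; subst h3; simp [eq_comm]
  · simp only [beq_iff_eq] at h4; subst h4; simp [eq_comm]
  · simp only [beq_iff_eq] at h5; subst h5; simp [eq_comm]
  · simp only [beq_iff_eq] at h6; subst h6; simp [eq_comm]
  · simp only [beq_iff_eq] at h7; subst h7; simp [eq_comm]
  · simp only [beq_iff_eq] at *; simp_all [PySem.Dict.get?, eq_comm]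

lemma exact_get_iff (s : String) (r : Nat) :
    PySem.Dict.get? pvExactRules s = some r ↔
      ((s = "NdisRegisterProtocolDriver" ∧ r = 2) ∨ (s = "NdisMRegisterMiniportDriver" ∧ r = 2) ∨
       (s = "USBD_CreateConfigurationRequestEx" ∧ r = 4) ∨
       (s = "WdfUsbTargetDeviceSendControlTransferSynchronously" ∧ r = 4)) := by
  simp only [pvExactRules, PySem.Dict.get?_mk_cons]
  split_ifs with h1 h2 h3 h4
  · simp only [beq_iff_eq] at h1; subst h1; simp [eq_comm]
  · simp only [beq_iff_eq] at h2; subst h2; simp [eq_comm]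
  · simp only [beq_iff_eq] at h3; subst h3; simp [eq_comm]
  · simp only [beq_iff_eq] at h4; subst h4; simp [eq_comm]
  · simp only [beq_iff_eq] at *; simp_all [PySem.Dict.get?, eq_comm]

lemma dll_get_iff (s : String) (r : Nat) :
    PySem.Dict.get? pvDllRules s = some r ↔
      ((s = "bthport.sys" ∧ r = 3) ∨ (s = "bthhfp.sys" ∧ r = 3) ∨
       (s = "pjlmon.dll" ∧ r = 9) ∨ (s = "tcpmon.dll" ∧ r = 9) ∨ (s = "usbmon.dll" ∧ r = 9)) := by
  simp only [pvDllRules, PySem.Dict.get?_mk_cons]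
  split_ifs with h1 h2 h3 h4 h5
  · simp only [beq_iff_eq] at h1; subst h1; simp [eq_comm]
  · simp only [beq_iff_eq] at h2; subst h2; simp [eq_comm]
  · simp only [beq_iff_eq] at h3; subst h3; simp [eq_comm]
  · simp only [beq_iff_eq] at h4; subst h4; simp [eq_comm]
  · simp only [beq_iff_eq] at h5; subst h5; simp [eq_comm]
  · simp only [beq_iff_eq] at *; simp_all [PySem.Dict.get?, eq_comm]

-- one step of the imports loop, membership in the candidate list
lemma importStep_fst_mem (st : List Nat × Bool) (n : String) (r : Nat) :
    r ∈ (pvImportStep st n).1 ↔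
      r ∈ st.1 ∨ PySem.Dict.get? pvExactRules n = some r ∨
        PySem.Dict.get? pvLowerRules (PySem.Str.lower n) = some r := by
  unfold pvImportStep
  cases hE : PySem.Dict.get? pvExactRules n <;>
    cases hL : PySem.Dict.get? pvLowerRules (PySem.Str.lower n) <;>
      simp [hE, hL, eq_comm]

-- the imports loop: membership in the accumulated candidate list
lemma scan_fst_mem (l : List String) (st : List Nat × Bool) (r : Nat) :
    r ∈ (l.foldl pvImportStep st).1 ↔
      r ∈ st.1 ∨ ∃ n ∈ l, (PySem.Dict.get? pvExactRules n = some r ∨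
        PySem.Dict.get? pvLowerRules (PySem.Str.lower n) = some r) := by
  induction l generalizing st with
  | nil => simp
  | cons n t ih =>
    simp only [List.foldl_cons, ih, importStep_fst_mem, List.mem_cons]
    constructor
    · rintro ((h | h) | ⟨m, hm, hh⟩)
      · exact Or.inl h
      · exact Or.inr ⟨n, Or.inl rfl, h⟩
      · exact Or.inr ⟨m, Or.inr hm, hh⟩
    · rintro (h | ⟨m, (rfl | hm), hh⟩)
      · exact Or.inl (Or.inl h)
      · exact Or.inl (Or.inr hh)
      · exact Or.inr ⟨m, hm, hh⟩

-- the imports loop: the has_wdf flag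
lemma scan_snd (l : List String) (st : List Nat × Bool) :
    (l.foldl pvImportStep st).2 = (st.2 || l.any (fun n => PySem.Str.lower n == "wdfdrivercreate")) := by
  induction l generalizing st with
  | nil => simp
  | cons n t ih =>
    rw [List.foldl_cons, ih]
    show ((st.2 || (PySem.Str.lower n == "wdfdrivercreate")) || _) = _
    rw [List.any_cons, Bool.or_assoc]

-- the dlls loop: membership in the final candidate list
lemma dllscan_mem (l : List String) (acc : List Nat) (r : Nat) :
    r ∈ l.foldl pvDllStep acc ↔ r ∈ acc ∨ ∃ d ∈ l, PySem.Dict.get? pvDllRules d = some r := by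
  induction l generalizing acc with
  | nil => simp
  | cons d t ih =>
    simp only [List.foldl_cons, ih, List.mem_cons]
    have hstep : r ∈ pvDllStep acc d ↔ r ∈ acc ∨ PySem.Dict.get? pvDllRules d = some r := by
      unfold pvDllStep
      cases hD : PySem.Dict.get? pvDllRules d <;> simp [hD, eq_comm]
    rw [hstep]
    constructor
    · rintro ((h | h) | ⟨m, hm, hh⟩)
      · exact Or.inl h
      · exact Or.inr ⟨d, Or.inl rfl, h⟩
      · exact Or.inr ⟨m, Or.inr hm, hh⟩
    · rintro (h | ⟨m, (rfl | hm), hh⟩)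
      · exact Or.inl (Or.inl h)
      · exact Or.inl (Or.inr hh)
      · exact Or.inr ⟨m, hm, hh⟩

-- selection lemma: min-with-default over a list of priorities ≤ 9 equals the first-hit chain
lemma min_sel (l : List Nat) (h0 h1 h2 h3 h4 h5 h6 h7 h8 h9 : Bool)
    (Hb : ∀ x ∈ l, x ≤ 9)
    (H0 : 0 ∈ l ↔ h0 = true) (H1 : 1 ∈ l ↔ h1 = true) (H2 : 2 ∈ l ↔ h2 = true)
    (H3 : 3 ∈ l ↔ h3 = true) (H4 : 4 ∈ l ↔ h4 = true) (H5 : 5 ∈ l ↔ h5 = true)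
    (H6 : 6 ∈ l ↔ h6 = true) (H7 : 7 ∈ l ↔ h7 = true) (H8 : 8 ∈ l ↔ h8 = true)
    (H9 : 9 ∈ l ↔ h9 = true) :
    (PySem.List.min? l (fun x => x)).getD 10 =
      (if h0 then 0 else if h1 then 1 else if h2 then 2 else if h3 then 3 else if h4 then 4
       else if h5 then 5 else if h6 then 6 else if h7 then 7 else if h8 then 8
       else if h9 then 9 else 10 : Nat) := by
  cases hmin : PySem.List.min? l (fun x => x) with
  | none =>
    have hl : l = [] := (PySem.List.min?_eq_none_iff l (fun x => x)).mp hmin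
    subst hl
    simp only [List.not_mem_nil, false_iff] at H0 H1 H2 H3 H4 H5 H6 H7 H8 H9
    simp_all
  | some m =>
    have hmem : m ∈ l := PySem.List.min?_mem hmin
    have hle : ∀ y ∈ l, m ≤ y := PySem.List.min?_isMin hmin
    have hm9 : m ≤ 9 := Hb m hmem
    simp only [Option.getD_some]
    interval_cases m
    · have ht : h0 = true := H0.mp hmem
      simp [ht]
    · have ht : h1 = true := H1.mp hmem
      have hf0 : h0 = false := by
        cases hh : h0 with
        | true => exact absurd (hle 0 (H0.mpr hh)) (by omega)
        | false => rfl
      simp [hf0, ht]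
    · have ht : h2 = true := H2.mp hmem
      have hf0 : h0 = false := by
        cases hh : h0 with
        | true => exact absurd (hle 0 (H0.mpr hh)) (by omega)
        | false => rfl
      have hf1 : h1 = false := by
        cases hh : h1 with
        | true => exact absurd (hle 1 (H1.mpr hh)) (by omega)
        | false => rfl
      simp [hf0, hf1, ht]
    · have ht : h3 = true := H3.mp hmem
      have hf0 : h0 = false := by
        cases hh : h0 with
        | true => exact absurd (hle 0 (H0.mpr hh)) (by omega)
        | false => rfl
      have hf1 : h1 = false := by
        cases hh : h1 with
        | true => exact absurd (hle 1 (H1.mpr hh)) (by omega)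
        | false => rfl
      have hf2 : h2 = false := by
        cases hh : h2 with
        | true => exact absurd (hle 2 (H2.mpr hh)) (by omega)
        | false => rfl
      simp [hf0, hf1, hf2, ht]
    · have ht : h4 = true := H4.mp hmem
      have hf0 : h0 = false := by
        cases hh : h0 with
        | true => exact absurd (hle 0 (H0.mpr hh)) (by omega)
        | false => rfl
      have hf1 : h1 = false := by
        cases hh : h1 with
        | true => exact absurd (hle 1 (H1.mpr hh)) (by omega)
        | false => rfl
      have hf2 : h2 = false := by
        cases hh : h2 with
        | true => exact absurd (hle 2 (H2.mpr hh)) (by omega)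
        | false => rfl
      have hf3 : h3 = false := by
        cases hh : h3 with
        | true => exact absurd (hle 3 (H3.mpr hh)) (by omega)
        | false => rfl
      simp [hf0, hf1, hf2, hf3, ht]
    · have ht : h5 = true := H5.mp hmem
      have hf0 : h0 = false := by
        cases hh : h0 with
        | true => exact absurd (hle 0 (H0.mpr hh)) (by omega)
        | false => rfl
      have hf1 : h1 = false := by
        cases hh : h1 with
        | true => exact absurd (hle 1 (H1.mpr hh)) (by omega)
        | false => rfl
      have hf2 : h2 = false := by
        cases hh : h2 with
        | true => exact absurd (hle 2 (H2.mpr hh)) (by omega)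
        | false => rfl
      have hf3 : h3 = false := by
        cases hh : h3 with
        | true => exact absurd (hle 3 (H3.mpr hh)) (by omega)
        | false => rfl
      have hf4 : h4 = false := by
        cases hh : h4 with
        | true => exact absurd (hle 4 (H4.mpr hh)) (by omega)
        | false => rfl
      simp [hf0, hf1, hf2, hf3, hf4, ht]
    · have ht : h6 = true := H6.mp hmem
      have hf0 : h0 = false := by
        cases hh : h0 with
        | true => exact absurd (hle 0 (H0.mpr hh)) (by omega)
        | false => rfl
      have hf1 : h1 = false := by
        cases hh : h1 with
        | true => exact absurd (hle 1 (H1.mpr hh)) (by omega)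
        | false => rfl
      have hf2 : h2 = false := by
        cases hh : h2 with
        | true => exact absurd (hle 2 (H2.mpr hh)) (by omega)
        | false => rfl
      have hf3 : h3 = false := by
        cases hh : h3 with
        | true => exact absurd (hle 3 (H3.mpr hh)) (by omega)
        | false => rfl
      have hf4 : h4 = false := by
        cases hh : h4 with
        | true => exact absurd (hle 4 (H4.mpr hh)) (by omega)
        | false => rfl
      have hf5 : h5 = false := by
        cases hh : h5 with
        | true => exact absurd (hle 5 (H5.mpr hh)) (by omega)
        | false => rfl
      simp [hf0, hf1, hf2, hf3, hf4, hf5, ht]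
    · have ht : h7 = true := H7.mp hmem
      have hf0 : h0 = false := by
        cases hh : h0 with
        | true => exact absurd (hle 0 (H0.mpr hh)) (by omega)
        | false => rfl
      have hf1 : h1 = false := by
        cases hh : h1 with
        | true => exact absurd (hle 1 (H1.mpr hh)) (by omega)
        | false => rfl
      have hf2 : h2 = false := by
        cases hh : h2 with
        | true => exact absurd (hle 2 (H2.mpr hh)) (by omega)
        | false => rfl
      have hf3 : h3 = false := by
        cases hh : h3 with
        | true => exact absurd (hle 3 (H3.mpr hh)) (by omega)
        | false => rfl
      have hf4 : h4 = false := by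
        cases hh : h4 with
        | true => exact absurd (hle 4 (H4.mpr hh)) (by omega)
        | false => rfl
      have hf5 : h5 = false := by
        cases hh : h5 with
        | true => exact absurd (hle 5 (H5.mpr hh)) (by omega)
        | false => rfl
      have hf6 : h6 = false := by
        cases hh : h6 with
        | true => exact absurd (hle 6 (H6.mpr hh)) (by omega)
        | false => rfl
      simp [hf0, hf1, hf2, hf3, hf4, hf5, hf6, ht]
    · have ht : h8 = true := H8.mp hmem
      have hf0 : h0 = false := by
        cases hh : h0 with
        | true => exact absurd (hle 0 (H0.mpr hh)) (by omega)
        | false => rfl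
      have hf1 : h1 = false := by
        cases hh : h1 with
        | true => exact absurd (hle 1 (H1.mpr hh)) (by omega)
        | false => rfl
      have hf2 : h2 = false := by
        cases hh : h2 with
        | true => exact absurd (hle 2 (H2.mpr hh)) (by omega)
        | false => rfl
      have hf3 : h3 = false := by
        cases hh : h3 with
        | true => exact absurd (hle 3 (H3.mpr hh)) (by omega)
        | false => rfl
      have hf4 : h4 = false := by
        cases hh : h4 with
        | true => exact absurd (hle 4 (H4.mpr hh)) (by omega)
        | false => rfl
      have hf5 : h5 = false := by
        cases hh : h5 with
        | true => exact absurd (hle 5 (H5.mpr hh)) (by omega)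
        | false => rfl
      have hf6 : h6 = false := by
        cases hh : h6 with
        | true => exact absurd (hle 6 (H6.mpr hh)) (by omega)
        | false => rfl
      have hf7 : h7 = false := by
        cases hh : h7 with
        | true => exact absurd (hle 7 (H7.mpr hh)) (by omega)
        | false => rfl
      simp [hf0, hf1, hf2, hf3, hf4, hf5, hf6, hf7, ht]
    · have ht : h9 = true := H9.mp hmem
      have hf0 : h0 = false := by
        cases hh : h0 with
        | true => exact absurd (hle 0 (H0.mpr hh)) (by omega)
        | false => rfl
      have hf1 : h1 = false := by
        cases hh : h1 with
        | true => exact absurd (hle 1 (H1.mpr hh)) (by omega)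
        | false => rfl
      have hf2 : h2 = false := by
        cases hh : h2 with
        | true => exact absurd (hle 2 (H2.mpr hh)) (by omega)
        | false => rfl
      have hf3 : h3 = false := by
        cases hh : h3 with
        | true => exact absurd (hle 3 (H3.mpr hh)) (by omega)
        | false => rfl
      have hf4 : h4 = false := by
        cases hh : h4 with
        | true => exact absurd (hle 4 (H4.mpr hh)) (by omega)
        | false => rfl
      have hf5 : h5 = false := by
        cases hh : h5 with
        | true => exact absurd (hle 5 (H5.mpr hh)) (by omega)
        | false => rfl
      have hf6 : h6 = false := by
        cases hh : h6 with
        | true => exact absurd (hle 6 (H6.mpr hh)) (by omega)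
        | false => rfl
      have hf7 : h7 = false := by
        cases hh : h7 with
        | true => exact absurd (hle 7 (H7.mpr hh)) (by omega)
        | false => rfl
      have hf8 : h8 = false := by
        cases hh : h8 with
        | true => exact absurd (hle 8 (H8.mpr hh)) (by omega)
        | false => rfl
      simp [hf0, hf1, hf2, hf3, hf4, hf5, hf6, hf7, hf8, ht]


-- priority 0 is collected iff A's rule-0 condition fires
lemma hit0 (imports dl : List String) :
    ((0 : Nat) ∈ (List.foldl pvDllStep (List.foldl pvImportStep ([], false) imports).1 dl).filter
      (fun c => (c != 1) || !(List.foldl pvImportStep ([], false) imports).2)) ↔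
    (PySem.Set.contains (PySem.Set.ofList (imports.map PySem.Str.lower)) "fltregisterfilter") = true := by
  rw [List.mem_filter, dllscan_mem, scan_fst_mem]
  simp [exact_get_iff, lower_get_iff, dll_get_iff, scan_snd, PySem.Set.contains_eq_listContains,
        PySem.Set.mem_ofList, PySem.Set.mem_inter, List.isEmpty_eq_false_iff_exists_mem]
  all_goals
    try simp only [List.eq_nil_iff_forall_not_mem, PySem.Set.mem_inter, PySem.Set.mem_ofList,
               List.mem_cons, List.not_mem_nil, or_false, not_forall, not_not, List.mem_map]
  all_goals aesop

-- priority 1 is collected iff A's rule-1 condition fires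
lemma hit1 (imports dl : List String) :
    ((1 : Nat) ∈ (List.foldl pvDllStep (List.foldl pvImportStep ([], false) imports).1 dl).filter
      (fun c => (c != 1) || !(List.foldl pvImportStep ([], false) imports).2)) ↔
    (PySem.Set.contains (PySem.Set.ofList (imports.map PySem.Str.lower)) "iocreatedevice" && !(PySem.Set.contains (PySem.Set.ofList (imports.map PySem.Str.lower)) "wdfdrivercreate")) = true := by
  rw [List.mem_filter, dllscan_mem, scan_fst_mem]
  simp [exact_get_iff, lower_get_iff, dll_get_iff, scan_snd, PySem.Set.contains_eq_listContains,
        PySem.Set.mem_ofList, PySem.Set.mem_inter, List.isEmpty_eq_false_iff_exists_mem]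
  all_goals
    try simp only [List.eq_nil_iff_forall_not_mem, PySem.Set.mem_inter, PySem.Set.mem_ofList,
               List.mem_cons, List.not_mem_nil, or_false, not_forall, not_not, List.mem_map]
  all_goals aesop

-- priority 2 is collected iff A's rule-2 condition fires
lemma hit2 (imports dl : List String) :
    ((2 : Nat) ∈ (List.foldl pvDllStep (List.foldl pvImportStep ([], false) imports).1 dl).filter
      (fun c => (c != 1) || !(List.foldl pvImportStep ([], false) imports).2)) ↔
    (!(PySem.Set.inter (PySem.Set.ofList imports) ["NdisRegisterProtocolDriver", "NdisMRegisterMiniportDriver"]).isEmpty) = true := by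
  rw [List.mem_filter, dllscan_mem, scan_fst_mem]
  simp [exact_get_iff, lower_get_iff, dll_get_iff, scan_snd, PySem.Set.contains_eq_listContains,
        PySem.Set.mem_ofList, PySem.Set.mem_inter, List.isEmpty_eq_false_iff_exists_mem]
  all_goals
    try simp only [List.eq_nil_iff_forall_not_mem, PySem.Set.mem_inter, PySem.Set.mem_ofList,
               List.mem_cons, List.not_mem_nil, or_false, not_forall, not_not, List.mem_map]
  all_goals aesop

-- priority 3 is collected iff A's rule-3 condition fires
lemma hit3 (imports dl : List String) :
    ((3 : Nat) ∈ (List.foldl pvDllStep (List.foldl pvImportStep ([], false) imports).1 dl).filter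
      (fun c => (c != 1) || !(List.foldl pvImportStep ([], false) imports).2)) ↔
    (!(PySem.Set.inter (PySem.Set.ofList dl) ["bthport.sys", "bthhfp.sys"]).isEmpty) = true := by
  rw [List.mem_filter, dllscan_mem, scan_fst_mem]
  simp [exact_get_iff, lower_get_iff, dll_get_iff, scan_snd, PySem.Set.contains_eq_listContains,
        PySem.Set.mem_ofList, PySem.Set.mem_inter, List.isEmpty_eq_false_iff_exists_mem]
  all_goals
    try simp only [List.eq_nil_iff_forall_not_mem, PySem.Set.mem_inter, PySem.Set.mem_ofList,
               List.mem_cons, List.not_mem_nil, or_false, not_forall, not_not, List.mem_map]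
  all_goals aesop

-- priority 4 is collected iff A's rule-4 condition fires
lemma hit4 (imports dl : List String) :
    ((4 : Nat) ∈ (List.foldl pvDllStep (List.foldl pvImportStep ([], false) imports).1 dl).filter
      (fun c => (c != 1) || !(List.foldl pvImportStep ([], false) imports).2)) ↔
    (!(PySem.Set.inter (PySem.Set.ofList imports) ["USBD_CreateConfigurationRequestEx", "WdfUsbTargetDeviceSendControlTransferSynchronously"]).isEmpty) = true := by
  rw [List.mem_filter, dllscan_mem, scan_fst_mem]
  simp [exact_get_iff, lower_get_iff, dll_get_iff, scan_snd, PySem.Set.contains_eq_listContains,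
        PySem.Set.mem_ofList, PySem.Set.mem_inter, List.isEmpty_eq_false_iff_exists_mem]
  all_goals
    try simp only [List.eq_nil_iff_forall_not_mem, PySem.Set.mem_inter, PySem.Set.mem_ofList,
               List.mem_cons, List.not_mem_nil, or_false, not_forall, not_not, List.mem_map]
  all_goals aesop

-- priority 5 is collected iff A's rule-5 condition fires
lemma hit5 (imports dl : List String) :
    ((5 : Nat) ∈ (List.foldl pvDllStep (List.foldl pvImportStep ([], false) imports).1 dl).filter
      (fun c => (c != 1) || !(List.foldl pvImportStep ([], false) imports).2)) ↔
    (PySem.Set.contains (PySem.Set.ofList (imports.map PySem.Str.lower)) "wdfdrivercreate") = true := by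
  rw [List.mem_filter, dllscan_mem, scan_fst_mem]
  simp [exact_get_iff, lower_get_iff, dll_get_iff, scan_snd, PySem.Set.contains_eq_listContains,
        PySem.Set.mem_ofList, PySem.Set.mem_inter, List.isEmpty_eq_false_iff_exists_mem]
  all_goals
    try simp only [List.eq_nil_iff_forall_not_mem, PySem.Set.mem_inter, PySem.Set.mem_ofList,
               List.mem_cons, List.not_mem_nil, or_false, not_forall, not_not, List.mem_map]
  all_goals aesop

-- priority 6 is collected iff A's rule-6 condition fires
lemma hit6 (imports dl : List String) :
    ((6 : Nat) ∈ (List.foldl pvDllStep (List.foldl pvImportStep ([], false) imports).1 dl).filter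
      (fun c => (c != 1) || !(List.foldl pvImportStep ([], false) imports).2)) ↔
    (PySem.Set.contains (PySem.Set.ofList (imports.map PySem.Str.lower)) "dxgkinitialize") = true := by
  rw [List.mem_filter, dllscan_mem, scan_fst_mem]
  simp [exact_get_iff, lower_get_iff, dll_get_iff, scan_snd, PySem.Set.contains_eq_listContains,
        PySem.Set.mem_ofList, PySem.Set.mem_inter, List.isEmpty_eq_false_iff_exists_mem]
  all_goals
    try simp only [List.eq_nil_iff_forall_not_mem, PySem.Set.mem_inter, PySem.Set.mem_ofList,
               List.mem_cons, List.not_mem_nil, or_false, not_forall, not_not, List.mem_map]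
  all_goals aesop

-- priority 7 is collected iff A's rule-7 condition fires
lemma hit7 (imports dl : List String) :
    ((7 : Nat) ∈ (List.foldl pvDllStep (List.foldl pvImportStep ([], false) imports).1 dl).filter
      (fun c => (c != 1) || !(List.foldl pvImportStep ([], false) imports).2)) ↔
    (PySem.Set.contains (PySem.Set.ofList (imports.map PySem.Str.lower)) "portclscreate" || PySem.Set.contains (PySem.Set.ofList (imports.map PySem.Str.lower)) "pcregistersubdevice") = true := by
  rw [List.mem_filter, dllscan_mem, scan_fst_mem]
  simp [exact_get_iff, lower_get_iff, dll_get_iff, scan_snd, PySem.Set.contains_eq_listContains,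
        PySem.Set.mem_ofList, PySem.Set.mem_inter, List.isEmpty_eq_false_iff_exists_mem]
  all_goals
    try simp only [List.eq_nil_iff_forall_not_mem, PySem.Set.mem_inter, PySem.Set.mem_ofList,
               List.mem_cons, List.not_mem_nil, or_false, not_forall, not_not, List.mem_map]
  all_goals aesop

-- priority 8 is collected iff A's rule-8 condition fires
lemma hit8 (imports dl : List String) :
    ((8 : Nat) ∈ (List.foldl pvDllStep (List.foldl pvImportStep ([], false) imports).1 dl).filter
      (fun c => (c != 1) || !(List.foldl pvImportStep ([], false) imports).2)) ↔
    (PySem.Set.contains (PySem.Set.ofList (imports.map PySem.Str.lower)) "hidregisterminidriver") = true := by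
  rw [List.mem_filter, dllscan_mem, scan_fst_mem]
  simp [exact_get_iff, lower_get_iff, dll_get_iff, scan_snd, PySem.Set.contains_eq_listContains,
        PySem.Set.mem_ofList, PySem.Set.mem_inter, List.isEmpty_eq_false_iff_exists_mem]
  all_goals
    try simp only [List.eq_nil_iff_forall_not_mem, PySem.Set.mem_inter, PySem.Set.mem_ofList,
               List.mem_cons, List.not_mem_nil, or_false, not_forall, not_not, List.mem_map]
  all_goals aesop

-- priority 9 is collected iff A's rule-9 condition fires
lemma hit9 (imports dl : List String) :
    ((9 : Nat) ∈ (List.foldl pvDllStep (List.foldl pvImportStep ([], false) imports).1 dl).filter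
      (fun c => (c != 1) || !(List.foldl pvImportStep ([], false) imports).2)) ↔
    (!(PySem.Set.inter (PySem.Set.ofList dl) ["pjlmon.dll", "tcpmon.dll", "usbmon.dll"]).isEmpty) = true := by
  rw [List.mem_filter, dllscan_mem, scan_fst_mem]
  simp [exact_get_iff, lower_get_iff, dll_get_iff, scan_snd, PySem.Set.contains_eq_listContains,
        PySem.Set.mem_ofList, PySem.Set.mem_inter, List.isEmpty_eq_false_iff_exists_mem]
  all_goals
    try simp only [List.eq_nil_iff_forall_not_mem, PySem.Set.mem_inter, PySem.Set.mem_ofList,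
               List.mem_cons, List.not_mem_nil, or_false, not_forall, not_not, List.mem_map]
  all_goals aesop

-- every collected priority is ≤ 9
lemma hit_le (imports dl : List String) :
    ∀ x ∈ (List.foldl pvDllStep (List.foldl pvImportStep ([], false) imports).1 dl).filter
      (fun c => (c != 1) || !(List.foldl pvImportStep ([], false) imports).2), x ≤ 9 := by
  intro x hx
  rw [List.mem_filter] at hx
  have h := hx.1
  rw [dllscan_mem, scan_fst_mem] at h
  simp only [exact_get_iff, lower_get_iff, dll_get_iff, List.not_mem_nil, false_or] at h
  rcases h with (⟨n, _, h | h⟩ | ⟨d, _, h⟩)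
  · rcases h with ⟨_,rfl⟩|⟨_,rfl⟩|⟨_,rfl⟩|⟨_,rfl⟩ <;> norm_num
  · rcases h with ⟨_,rfl⟩|⟨_,rfl⟩|⟨_,rfl⟩|⟨_,rfl⟩|⟨_,rfl⟩|⟨_,rfl⟩|⟨_,rfl⟩ <;> norm_num
  · rcases h with ⟨_,rfl⟩|⟨_,rfl⟩|⟨_,rfl⟩|⟨_,rfl⟩|⟨_,rfl⟩ <;> norm_num

-- both sides are the same 11-way selection
lemma chain_eq (b0 b1 b2 b3 b4 b5 b6 b7 b8 b9 : Bool) :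
    (if b0 then
      [("class", "CRITICAL"), ("category", "File system filter"),
    ("exploitability", "FS filters intercept all file I/O; bugs = system-wide impact")]
    else if b1 then
      [("class", "CRITICAL"), ("category", "Raw WDM driver"),
    ("exploitability", "No WDF safety rails; manual IRP handling prone to bugs")]
    else if b2 then
      [("class", "HIGH"), ("category", "NDIS network driver"),
    ("exploitability", "Network packet parsing in kernel; remote attack surface")]
    else if b3 then
      [("class", "HIGH"), ("category", "Bluetooth driver"),
    ("exploitability", "BT stack in kernel; proximity-based attack surface")]
    else if b4 then
      [("class", "HIGH"), ("category", "USB function driver"),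
    ("exploitability", "USB request handling in kernel; physical/logical attack surface")]
    else if b5 then
      [("class", "MEDIUM"), ("category", "WDF/KMDF driver"),
    ("exploitability", "WDF provides safety rails but bugs still possible")]
    else if b6 then
      [("class", "MEDIUM"), ("category", "Display/GPU driver"),
    ("exploitability", "Complex IOCTL surface but often well-audited")]
    else if b7 then
      [("class", "LOW"), ("category", "Audio (PortCls) driver"),
    ("exploitability", "Minimal direct user IOCTL surface")]
    else if b8 then
      [("class", "LOW"), ("category", "HID minidriver"),
    ("exploitability", "Limited attack surface through HID stack")]
    else if b9 then
      [("class", "LOW"), ("category", "Printer driver"),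
    ("exploitability", "Typically sandboxed print pipeline")]
    else 
      [("class", "UNKNOWN"), ("category", "Unclassified"), ("exploitability", "Manual review needed")]) = pvResults.getD (if b0 then 0 else if b1 then 1 else if b2 then 2 else if b3 then 3 else if b4 then 4 else if b5 then 5 else if b6 then 6 else if b7 then 7 else if b8 then 8 else if b9 then 9 else 10 : Nat) [] := by
  cases b0 with
  | true => rfl
  | false =>
    cases b1 with
    | true => rfl
    | false =>
      cases b2 with
      | true => rfl
      | false =>
        cases b3 with
        | true => rfl
        | false =>
          cases b4 with
          | true => rfl
          | false =>
            cases b5 with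
            | true => rfl
            | false =>
              cases b6 with
              | true => rfl
              | false =>
                cases b7 with
                | true => rfl
                | false =>
                  cases b8 with
                  | true => rfl
                  | false =>
                    cases b9 with
                    | true => rfl
                    | false =>
                      rfl

-- ===== VERDICT =====
theorem classify_driver_class_spec : Claim_equal_classify_driver_class := by
  intro imports import_dlls _
  unfold Spec_classify_driver_class
  simp only [classify_driver_class,
             contains_or_lower imports "FltRegisterFilter" "fltregisterfilter" (by decide),
             contains_or_lower imports "IoCreateDevice" "iocreatedevice" (by decide),
             contains_or_lower imports "WdfDriverCreate" "wdfdrivercreate" (by decide),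
             contains_or_lower imports "DxgkInitialize" "dxgkinitialize" (by decide),
             audio_or_collapse imports, hid_collapse imports]
  rw [show classify_driver_class_alt imports import_dlls =
        pvResults.getD ((PySem.List.min? ((List.foldl pvDllStep (List.foldl pvImportStep ([], false) imports).1 (import_dlls.getD [])).filter
      (fun c => (c != 1) || !(List.foldl pvImportStep ([], false) imports).2)) (fun x => x)).getD 10) [] from rfl]
  rw [min_sel _ _ _ _ _ _ _ _ _ _ _
        (hit_le imports (import_dlls.getD []))
        (hit0 imports (import_dlls.getD [])) (hit1 imports (import_dlls.getD []))
        (hit2 imports (import_dlls.getD [])) (hit3 imports (import_dlls.getD []))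
        (hit4 imports (import_dlls.getD [])) (hit5 imports (import_dlls.getD []))
        (hit6 imports (import_dlls.getD [])) (hit7 imports (import_dlls.getD []))
        (hit8 imports (import_dlls.getD [])) (hit9 imports (import_dlls.getD []))]
  exact chain_eq _ _ _ _ _ _ _ _ _ _
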